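-- pv_equiv track=rewrite | github.com/IDAES/idaes-pse | idaes/core/dmf/util.py | uuid_prefix_len
-- ===== SOURCE A (Python) =====
-- def uuid_prefix_len(uuids, step=4, maxlen=32):
--     """Get smallest multiple of `step` len prefix that gives unique values.
--
--     The algorithm is not fancy, but good enough: build *sets* of
--     the ids at increasing prefix lengths until the set has all ids (no duplicates).
--     Experimentally this takes ~.1ms for 1000 duplicate ids (the worst case).
--     """
--     full = set(uuids)
--     all_of_them = len(full)
--     for n in range(step, maxlen, step):
--         prefixes = {u[:n] for u in uuids}
--         if len(prefixes) == all_of_them: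
--             return n
--     return maxlen
-- ===== SOURCE B (Python) =====
-- def uuid_prefix_len(uuids, step=4, maxlen=32):
--     """Closed form: sort the distinct ids, take 1 + the longest common prefix
--     of any adjacent pair, round up to the next multiple of `step`, cap at `maxlen`."""
--     ids = sorted(set(uuids))
--     need = 1
--     for u, v in zip(ids, ids[1:]):
--         k = 0
--         while k < len(u) and k < len(v) and u[k] == v[k]:
--             k += 1
--         if k + 1 > need:
--             need = k + 1
--     if step < 1:
--         return maxlen
--     n = -(-need // step) * step
--     return n if n < maxlen else maxlen
-- ===== Notes on version B (the rewrite author's own statement) =====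
-- stated objective: alternative
-- what changed: A rescans all ids building a prefix set at each candidate length until it is duplicate-free; B sorts the distinct ids once, takes 1 + the longest common prefix of any adjacent pair, rounds it up to the next multiple of step and caps at maxlen.
-- outside the precondition, e.g. on uuid_prefix_len(['ab', 'cd'], -1, -3): A returns -1, B returns -3
-- crash fix: On step = 0 Python's range raises ValueError; B returns maxlen. — e.g. on uuid_prefix_len(["a"], 0, 32): A raises ValueError, B returns 32
import Mathlib
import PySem

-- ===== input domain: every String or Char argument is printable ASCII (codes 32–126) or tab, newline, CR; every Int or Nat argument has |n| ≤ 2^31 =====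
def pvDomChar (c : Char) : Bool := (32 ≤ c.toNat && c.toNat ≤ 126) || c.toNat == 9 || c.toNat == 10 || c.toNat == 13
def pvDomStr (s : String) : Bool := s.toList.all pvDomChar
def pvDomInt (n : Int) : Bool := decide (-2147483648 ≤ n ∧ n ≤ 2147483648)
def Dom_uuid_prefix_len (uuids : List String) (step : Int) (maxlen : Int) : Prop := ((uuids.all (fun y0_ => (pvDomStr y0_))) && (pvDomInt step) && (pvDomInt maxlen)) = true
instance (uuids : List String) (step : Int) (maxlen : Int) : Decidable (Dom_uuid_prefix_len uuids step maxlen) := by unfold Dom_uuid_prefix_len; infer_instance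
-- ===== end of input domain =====

-- B replaces A's repeated full-set rescans at increasing prefix lengths by a closed form:
-- 1 + the longest pairwise common prefix among the distinct ids, rounded up to a step multiple (alternative decomposition).


-- ===== PORT A =====
-- the 'for n in range(step, maxlen, step)' loop with early return
def uuidALoop (uuids : List String) (allN : Int) (maxlen : Int) : List Int → Int
  | [] => maxlen
  | n :: rest =>
      if ((PySem.Set.ofList (uuids.map (fun u => PySem.Str.slice u none (some n)))).length : Int) = allN
      then n
      else uuidALoop uuids allN maxlen rest

def uuid_prefix_len (uuids : List String) (step : Int) (maxlen : Int) : Int :=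
  let full := PySem.Set.ofList uuids
  uuidALoop uuids (full.length : Int) maxlen (PySem.List.pyRange step maxlen step)

-- ===== PORT B =====
-- the inner 'while k < len(u) and k < len(v) and u[k] == v[k]: k += 1' counter
def uuidLcp : List Char → List Char → Int
  | a :: as, b :: bs => if a = b then 1 + uuidLcp as bs else 0
  | _, _ => 0

-- the 'for u, v in zip(ids, ids[1:]): …' adjacent-pair maximum
def uuidNeed (ids : List String) : Int :=
  (ids.zip ids.tail).foldl (fun acc p =>
    let k := uuidLcp p.1.toList p.2.toList
    if k + 1 > acc then k + 1 else acc) 1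

def uuid_prefix_len_alt (uuids : List String) (step : Int) (maxlen : Int) : Int :=
  let ids := PySem.List.sorted (PySem.Set.ofList uuids) (fun x => x) false
  let need := uuidNeed ids
  if step < 1 then maxlen
  else
    let n := -(PySem.Int.floordiv (-need) step) * step
    if n < maxlen then n else maxlen

-- ===== PRECONDITION & SPEC =====
-- Pre_ excludes step = 0, where range() raises ValueError, and the backwards-range corner step < 0 ∧ maxlen < step,
-- where A iterates over negative n and u[:n] slices from the end — a defensible accident of the range loop, outside
-- the natural domain of a positive prefix-length step.
def Pre_uuid_prefix_len (uuids : List String) (step : Int) (maxlen : Int) : Prop :=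
  step ≠ 0 ∧ (step < 0 → step ≤ maxlen)
instance (uuids : List String) (step : Int) (maxlen : Int) : Decidable (Pre_uuid_prefix_len uuids step maxlen) := by unfold Pre_uuid_prefix_len; infer_instance

def pvWitness_uuid_prefix_len : List String × Int × Int := (["a", "ab"], 4, 32)

-- On step = 0 Python's range(step, maxlen, step) raises ValueError; B returns maxlen (no admissible multiple of step).
def Raises_uuid_prefix_len (uuids : List String) (step : Int) (maxlen : Int) : Prop := step = 0
instance (uuids : List String) (step : Int) (maxlen : Int) : Decidable (Raises_uuid_prefix_len uuids step maxlen) := by unfold Raises_uuid_prefix_len; infer_instance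
def pvRaiseWitness_uuid_prefix_len : List String × Int × Int := (["a"], 0, 32)
def pvRaiseWitnessOut_uuid_prefix_len : Int := 32

def Spec_uuid_prefix_len (uuids : List String) (step : Int) (maxlen : Int) (out : Int) : Prop := out = uuid_prefix_len_alt uuids step maxlen
instance (uuids : List String) (step : Int) (maxlen : Int) (out : Int) : Decidable (Spec_uuid_prefix_len uuids step maxlen out) := by unfold Spec_uuid_prefix_len; infer_instance

-- ===== CLAIM (what is proved, stated in full; the proofs are below) =====
def Claim_equal_uuid_prefix_len : Prop := ∀ (uuids : List String) (step : Int) (maxlen : Int), Dom_uuid_prefix_len uuids step maxlen → Pre_uuid_prefix_len uuids step maxlen → Spec_uuid_prefix_len uuids step maxlen (uuid_prefix_len uuids step maxlen)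

def Claim_raises_uuid_prefix_len : Prop := (∀ (uuids : List String) (step : Int) (maxlen : Int), Dom_uuid_prefix_len uuids step maxlen → Raises_uuid_prefix_len uuids step maxlen → ¬ Pre_uuid_prefix_len uuids step maxlen) ∧ (Dom_uuid_prefix_len (pvRaiseWitness_uuid_prefix_len.1) (pvRaiseWitness_uuid_prefix_len.2.1) (pvRaiseWitness_uuid_prefix_len.2.2) ∧ Raises_uuid_prefix_len (pvRaiseWitness_uuid_prefix_len.1) (pvRaiseWitness_uuid_prefix_len.2.1) (pvRaiseWitness_uuid_prefix_len.2.2) ∧ uuid_prefix_len_alt (pvRaiseWitness_uuid_prefix_len.1) (pvRaiseWitness_uuid_prefix_len.2.1) (pvRaiseWitness_uuid_prefix_len.2.2) = pvRaiseWitnessOut_uuid_prefix_len)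

-- ===== LEMMAS AND PROOFS =====

-- empty range for positive step
lemma pyRange_nil_of_pos (a b s : Int) (hs : 0 < s) (h : b ≤ a) : PySem.List.pyRange a b s = [] := by
  rw [PySem.List.pyRange_of_pos a b hs]
  simp [not_lt.mpr h]

-- empty range for negative step when stop is not below start
lemma pyRange_nil_of_neg (a b s : Int) (hs : s < 0) (h : a ≤ b) : PySem.List.pyRange a b s = [] := by
  unfold PySem.List.pyRange
  rw [if_neg (by omega)]
  simp [not_lt.mpr hs.le, not_lt.mpr h]

-- one step of a positive-step range
lemma pyRange_cons_of_pos (a b s : Int) (hs : 0 < s) (h : a < b) :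
    PySem.List.pyRange a b s = a :: PySem.List.pyRange (a + s) b s := by
  rw [PySem.List.pyRange_of_pos a b hs, PySem.List.pyRange_of_pos (a + s) b hs]
  have hdiv : (b - a + s - 1) / s = (b - (a + s) + s - 1) / s + 1 := by
    have h1 : b - a + s - 1 = (b - (a + s) + s - 1) + 1 * s := by ring
    rw [h1, Int.add_mul_ediv_right _ _ (by omega : s ≠ 0)]
  have hc : ((b - a + s - 1) / s).toNat
      = (if a + s < b then ((b - (a + s) + s - 1) / s).toNat else 0) + 1 := by
    by_cases h2 : a + s < b
    · rw [if_pos h2]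
      have hnn : 0 ≤ (b - (a + s) + s - 1) / s := Int.ediv_nonneg (by omega) (by omega)
      omega
    · rw [if_neg h2]
      have hz : (b - (a + s) + s - 1) / s = 0 := Int.ediv_eq_zero_of_lt (by omega) (by omega)
      omega
  rw [if_pos h, hc, List.range_succ_eq_map]
  simp only [List.map_cons, List.map_map]
  congr 1
  · simp
  · apply List.map_congr_left
    intro k _
    simp only [Function.comp_apply]
    push_cast
    ring

-- characterization of B's running-maximum fold over the adjacent pairs
lemma uuidNeedFold_le_iff (l : List (String × String)) (acc n : Int) :
    (l.foldl (fun acc p =>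
      let k := uuidLcp p.1.toList p.2.toList
      if k + 1 > acc then k + 1 else acc) acc ≤ n)
    ↔ (acc ≤ n ∧ ∀ p ∈ l, uuidLcp p.1.toList p.2.toList + 1 ≤ n) := by
  induction l generalizing acc with
  | nil => simp
  | cons x xs ih =>
    simp only [List.foldl_cons, List.mem_cons, forall_eq_or_imp]
    rw [ih]
    split_ifs with h
    · constructor
      · rintro ⟨h1, h2⟩; exact ⟨by omega, by omega, h2⟩
      · rintro ⟨h1, h2, h3⟩; exact ⟨h2, h3⟩
    · constructor
      · rintro ⟨h1, h2⟩; exact ⟨h1, by omega, h2⟩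
      · rintro ⟨h1, _, h3⟩; exact ⟨h1, h3⟩

lemma uuidLcp_nonneg : ∀ as bs : List Char, 0 ≤ uuidLcp as bs := by
  intro as
  induction as with
  | nil => intro bs; simp [uuidLcp]
  | cons a as ih =>
    intro bs
    cases bs with
    | nil => simp [uuidLcp]
    | cons b bs =>
      simp only [uuidLcp]
      split_ifs with h
      · have := ih bs; omega
      · omega

lemma uuidLcp_comm : ∀ as bs : List Char, uuidLcp as bs = uuidLcp bs as := by
  intro as
  induction as with
  | nil => intro bs; cases bs <;> simp [uuidLcp]
  | cons a as ih =>
    intro bs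
    cases bs with
    | nil => simp [uuidLcp]
    | cons b bs =>
      simp only [uuidLcp]
      rcases eq_or_ne a b with h | h
      · subst h; simp [ih bs]
      · simp [h, Ne.symm h]

-- prefixes of equal length agree iff the length is at most the common-prefix length (or the lists are equal)
lemma take_eq_iff_lcp : ∀ (as bs : List Char) (k : Nat),
    (as.take k = bs.take k) ↔ ((k : Int) ≤ uuidLcp as bs ∨ as = bs) := by
  intro as
  induction as with
  | nil =>
    intro bs k
    cases bs with
    | nil => simp
    | cons b bs =>
      cases k with
      | zero => simp [uuidLcp_nonneg]
      | succ k => simp [uuidLcp]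
  | cons a as ih =>
    intro bs k
    cases bs with
    | nil =>
      cases k with
      | zero => simp [uuidLcp_nonneg]
      | succ k => simp [uuidLcp]
    | cons b bs =>
      cases k with
      | zero => simp [uuidLcp_nonneg]
      | succ k =>
        simp only [List.take_succ_cons, List.cons.injEq]
        rcases eq_or_ne a b with rfl | hab
        · rw [ih bs k]
          simp only [uuidLcp, true_and]
          push_cast
          constructor
          · rintro (h | h)
            · left; omega
            · right; exact h
          · rintro (h | h)
            · left; omega
            · right; exact h
        · simp only [uuidLcp, if_neg hab]
          constructor
          · rintro ⟨h, -⟩; exact absurd h hab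
          · rintro (h | ⟨h, -⟩)
            · exfalso; omega
            · exact absurd h hab

-- a list lexicographically between two others shares any common prefix of the outer pair
lemma take_sandwich : ∀ (k : Nat) (a b c : List Char),
    List.Lex (· < ·) a b → (List.Lex (· < ·) b c ∨ b = c) → a.take k = c.take k →
    b.take k = a.take k := by
  intro k
  induction k with
  | zero => intro a b c _ _ _; simp
  | succ k ih =>
    intro a b c hab hbc htake
    rcases hbc with hbc | rfl
    · cases hab with
      | nil =>
        cases c with
        | nil => cases hbc
        | cons z cs => simp at htake
      | rel h =>
        rename_i x as y bs
        cases c with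
        | nil => simp at htake
        | cons z cs =>
          simp only [List.take_succ_cons, List.cons.injEq] at htake
          obtain ⟨rfl, _⟩ := htake
          cases hbc with
          | rel h' => exact absurd h' (lt_asymm h)
          | cons h' => exact absurd h (lt_irrefl _)
      | cons h =>
        rename_i x as bs
        cases c with
        | nil => simp at htake
        | cons z cs =>
          simp only [List.take_succ_cons, List.cons.injEq] at htake
          obtain ⟨rfl, htk⟩ := htake
          have hbc' : List.Lex (· < ·) bs cs ∨ bs = cs := by
            cases hbc with
            | rel h' => exact absurd h' (lt_irrefl _)
            | cons h' => exact Or.inl h'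
          simp only [List.take_succ_cons, List.cons.injEq, true_and]
          exact ih as bs cs h hbc' htk
    · exact htake.symm

-- for a ≤ b ≤ c (strict below b), the common prefix of the outer pair is at most that of the inner pair
lemma lcp_le_of_between (a b c : List Char)
    (hab : List.Lex (· < ·) a b) (hbc : List.Lex (· < ·) b c ∨ b = c) :
    uuidLcp a c ≤ uuidLcp a b := by
  have hk : ((uuidLcp a c).toNat : Int) = uuidLcp a c := by
    have := uuidLcp_nonneg a c
    omega
  have htake : a.take (uuidLcp a c).toNat = c.take (uuidLcp a c).toNat :=
    (take_eq_iff_lcp a c (uuidLcp a c).toNat).mpr (Or.inl (by omega))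
  have hb := take_sandwich (uuidLcp a c).toNat a b c hab hbc htake
  rcases (take_eq_iff_lcp a b (uuidLcp a c).toNat).mp hb.symm with h | rfl
  · omega
  · exact absurd hab (fun h => lt_irrefl a ((List.lt_iff_lex_lt a a).mpr h))

-- String comparison is lexicographic comparison of the character lists
lemma strLt_lex {s t : String} (h : s < t) : List.Lex (· < ·) s.toList t.toList := by
  rw [← List.lt_iff_lex_lt]
  exact String.lt_iff_toList_lt.mp h

-- adjacent pairs of a strictly sorted list are ordered members
lemma adj_facts : ∀ (l : List String), l.Pairwise (· < ·) →
    ∀ p ∈ l.zip l.tail, p.1 ∈ l ∧ p.2 ∈ l ∧ p.1 < p.2 := by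
  intro l
  induction l with
  | nil => simp
  | cons x xs ih =>
    intro hp p hp'
    obtain ⟨hx, hpw⟩ := List.pairwise_cons.mp hp
    cases xs with
    | nil => simp at hp'
    | cons y ys =>
      rcases List.mem_cons.mp hp' with rfl | hmem
      · exact ⟨List.mem_cons_self, List.mem_cons_of_mem _ List.mem_cons_self,
          hx y List.mem_cons_self⟩
      · obtain ⟨h1, h2, h3⟩ := ih hpw p hmem
        exact ⟨List.mem_cons_of_mem _ h1, List.mem_cons_of_mem _ h2, h3⟩

-- the adjacent-pair bound of a strictly sorted list bounds every distinct pair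
lemma pairs_of_adj (n : Int) : ∀ (l : List String), l.Pairwise (· < ·) →
    (∀ p ∈ l.zip l.tail, uuidLcp p.1.toList p.2.toList + 1 ≤ n) →
    ∀ u ∈ l, ∀ v ∈ l, u ≠ v → uuidLcp u.toList v.toList + 1 ≤ n := by
  intro l
  induction l with
  | nil => simp
  | cons x xs ih =>
    intro hp hadj u hu v hv huv
    obtain ⟨hx, hp'⟩ := List.pairwise_cons.mp hp
    have hadj' : ∀ p ∈ xs.zip xs.tail, uuidLcp p.1.toList p.2.toList + 1 ≤ n := by
      intro p hmem
      apply hadj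
      cases xs with
      | nil => simp at hmem
      | cons y ys => exact List.mem_cons_of_mem _ hmem
    have hxmem : ∀ w ∈ xs, uuidLcp x.toList w.toList + 1 ≤ n := by
      intro w hw
      cases xs with
      | nil => cases hw
      | cons y ys =>
        have hxy : uuidLcp x.toList y.toList + 1 ≤ n := by
          apply hadj (x, y)
          simp
        rcases List.mem_cons.mp hw with rfl | hwys
        · exact hxy
        · have hyw : y < w := (List.pairwise_cons.mp hp').1 w hwys
          have hxylt : x < y := hx y List.mem_cons_self
          have hle : uuidLcp x.toList w.toList ≤ uuidLcp x.toList y.toList :=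
            lcp_le_of_between x.toList y.toList w.toList (strLt_lex hxylt)
              (Or.inl (strLt_lex hyw))
          omega
    rcases List.mem_cons.mp hu with rfl | hu'
    · have hv' : v ∈ xs := by
        rcases List.mem_cons.mp hv with rfl | h
        · exact absurd rfl huv
        · exact h
      exact hxmem v hv'
    · rcases List.mem_cons.mp hv with rfl | hv'
      · rw [uuidLcp_comm]; exact hxmem u hu'
      · exact ih hp' hadj' u hu' v hv' huv

-- B's required length, characterised over the original list
lemma uuidNeed_le_iff (uuids : List String) (n : Int) :
    uuidNeed (PySem.List.sorted (PySem.Set.ofList uuids) (fun x => x) false) ≤ n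
    ↔ 1 ≤ n ∧ ∀ u ∈ uuids, ∀ v ∈ uuids, u ≠ v → uuidLcp u.toList v.toList + 1 ≤ n := by
  have hpw : (PySem.List.sorted (PySem.Set.ofList uuids) (fun x => x) false).Pairwise (· < ·) :=
    PySem.List.sorted_ofList_pairwise_lt uuids
  have hmem : ∀ u : String,
      u ∈ PySem.List.sorted (PySem.Set.ofList uuids) (fun x => x) false ↔ u ∈ uuids := by
    intro u
    rw [PySem.List.mem_sorted, PySem.Set.mem_ofList]
  unfold uuidNeed
  rw [uuidNeedFold_le_iff]
  constructor
  · rintro ⟨h1, hadj⟩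
    refine ⟨h1, ?_⟩
    intro u hu v hv huv
    exact pairs_of_adj n _ hpw hadj u ((hmem u).mpr hu) v ((hmem v).mpr hv) huv
  · rintro ⟨h1, hall⟩
    refine ⟨h1, ?_⟩
    intro p hp
    obtain ⟨h1', h2', h3'⟩ := adj_facts _ hpw p hp
    exact hall p.1 ((hmem p.1).mp h1') p.2 ((hmem p.2).mp h2') (ne_of_lt h3')

-- set-cardinality equality is injectivity on the members
lemma card_map_eq_iff (uuids : List String) (f : String → String) :
    (((PySem.Set.ofList (uuids.map f)).length : Int) = ((PySem.Set.ofList uuids).length : Int))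
    ↔ ∀ u ∈ uuids, ∀ v ∈ uuids, f u = f v → u = v := by
  have hlen : ∀ (xs : List String), (PySem.Set.ofList xs).length = xs.toFinset.card := by
    intro xs
    have hfs : (PySem.Set.ofList xs).toFinset = xs.toFinset := by
      ext y; simp [List.mem_toFinset, PySem.Set.mem_ofList]
    rw [← hfs, List.toFinset_card_of_nodup (PySem.Set.nodup_ofList xs)]
  have hmap : (uuids.map f).toFinset = uuids.toFinset.image f := by
    ext y; simp [List.mem_toFinset, Finset.mem_image]
  rw [Int.natCast_inj, hlen, hlen, hmap, Finset.card_image_iff]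
  simp [Set.InjOn]

-- A's loop test at length n ≥ 1 holds exactly when n reaches B's required length
lemma pred_iff_need_le (uuids : List String) (n : Int) (hn : 1 ≤ n) :
    (((PySem.Set.ofList (uuids.map (fun u => PySem.Str.slice u none (some n)))).length : Int)
      = ((PySem.Set.ofList uuids).length : Int))
    ↔ uuidNeed (PySem.List.sorted (PySem.Set.ofList uuids) (fun x => x) false) ≤ n := by
  rw [card_map_eq_iff, uuidNeed_le_iff]
  have hslice : ∀ u : String, (PySem.Str.slice u none (some n)).toList = u.toList.take n.toNat := by
    intro u
    rw [PySem.Str.toList_slice]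
    simp only [PySem.Chars.slice_eq_listSlice]
    rw [PySem.List.slice_to _ (by omega : (0:Int) ≤ n)]
  have hkey : ∀ u v : String,
      (PySem.Str.slice u none (some n) = PySem.Str.slice v none (some n))
      ↔ ((n : Int) ≤ uuidLcp u.toList v.toList ∨ u = v) := by
    intro u v
    rw [← String.toList_inj, hslice, hslice, take_eq_iff_lcp, String.toList_inj]
    have : ((n.toNat : Int)) = n := by omega
    rw [this]
  constructor
  · intro h
    refine ⟨hn, ?_⟩
    intro u hu v hv huv
    by_contra hc
    have hle : (n : Int) ≤ uuidLcp u.toList v.toList := by omega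
    exact huv (h u hu v hv ((hkey u v).mpr (Or.inl hle)))
  · rintro ⟨-, h⟩
    intro u hu v hv heq
    by_contra huv
    have := h u hu v hv huv
    rcases (hkey u v).mp heq with hle | rfl
    · omega
    · exact huv rfl

-- A's scan over the multiples of step returns the rounded-up value q*step (capped at maxlen)
-- the loop arriving exactly at the rounded-up multiple
lemma uuidALoop_top (uuids : List String) (step maxlen : Int) (hstep : 1 ≤ step)
    (N : Int) (hN : 1 ≤ N) (hNdef : N = uuidNeed (PySem.List.sorted (PySem.Set.ofList uuids) (fun x => x) false))
    (q : Int) (hq2 : N ≤ q * step) :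
    uuidALoop uuids ((PySem.Set.ofList uuids).length : Int) maxlen (PySem.List.pyRange (q * step) maxlen step)
    = if q * step < maxlen then q * step else maxlen := by
  by_cases hml : q * step < maxlen
  · rw [pyRange_cons_of_pos _ _ _ (by omega) hml]
    simp only [uuidALoop]
    rw [if_pos ((pred_iff_need_le uuids (q * step) (by omega)).mpr (hNdef ▸ hq2))]
    rw [if_pos hml]
  · rw [pyRange_nil_of_pos _ _ _ (by omega) (by omega)]
    simp only [uuidALoop]
    rw [if_neg hml]

lemma uuidALoop_spec (uuids : List String) (step maxlen : Int) (hstep : 1 ≤ step)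
    (N : Int) (hN : 1 ≤ N) (hNdef : N = uuidNeed (PySem.List.sorted (PySem.Set.ofList uuids) (fun x => x) false))
    (q : Int) (hq1 : (q - 1) * step < N) (hq2 : N ≤ q * step) :
    ∀ (m : Nat) (a j : Int), (q * step - a).toNat ≤ m → 1 ≤ j → a = j * step → a ≤ q * step →
      uuidALoop uuids ((PySem.Set.ofList uuids).length : Int) maxlen (PySem.List.pyRange a maxlen step)
      = if q * step < maxlen then q * step else maxlen := by
  intro m
  induction m with
  | zero =>
    intro a j hm hj haj hle
    have ha : a = q * step := by omega
    rw [ha]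
    exact uuidALoop_top uuids step maxlen hstep N hN hNdef q hq2
  | succ m ih =>
    intro a j hm hj haj hle
    by_cases hEq : a = q * step
    · rw [hEq]
      exact uuidALoop_top uuids step maxlen hstep N hN hNdef q hq2
    · have hlt : a < q * step := lt_of_le_of_ne hle hEq
      have hjq : j < q := by
        rw [haj] at hlt
        exact lt_of_mul_lt_mul_right hlt (by omega)
      have haN : a < N := by
        have h1 : j * step ≤ (q - 1) * step :=
          mul_le_mul_of_nonneg_right (by omega) (by omega)
        omega
      have ha1 : 1 ≤ a := by
        have h1 : 1 * step ≤ j * step := mul_le_mul_of_nonneg_right hj (by omega)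
        omega
      by_cases hml : a < maxlen
      · rw [pyRange_cons_of_pos _ _ _ (by omega) hml]
        simp only [uuidALoop]
        rw [if_neg (by
          intro hcond
          have := (pred_iff_need_le uuids a (by omega)).mp hcond
          rw [← hNdef] at this
          omega)]
        have hle' : (j + 1) * step ≤ q * step := mul_le_mul_of_nonneg_right (by omega) (by omega)
        have hexp : (j + 1) * step = j * step + step := by ring
        have hmeas : (q * step - (a + step)).toNat ≤ m := by omega
        exact ih (a + step) (j + 1) hmeas (by omega) (by rw [haj]; ring) (by omega)
      · rw [pyRange_nil_of_pos _ _ _ (by omega) (by omega)]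
        simp only [uuidALoop]
        rw [if_neg (by omega)]

-- ===== VERDICT (by name: the statement is the Claim_ definition above) =====
theorem uuid_prefix_len_spec : Claim_equal_uuid_prefix_len := by
  intro uuids step maxlen _ hpre
  obtain ⟨hs0, hneg⟩ := hpre
  show uuid_prefix_len uuids step maxlen = uuid_prefix_len_alt uuids step maxlen
  by_cases hs : step < 1
  · have hneg' : step < 0 := by omega
    simp only [uuid_prefix_len, uuid_prefix_len_alt]
    rw [pyRange_nil_of_neg _ _ _ hneg' (hneg hneg')]
    simp only [uuidALoop]
    rw [if_pos hs]
  · have hstep : 1 ≤ step := by omega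
    simp only [uuid_prefix_len, uuid_prefix_len_alt]
    set N := uuidNeed (PySem.List.sorted (PySem.Set.ofList uuids) (fun x => x) false) with hNdef
    have hN : 1 ≤ N := ((uuidNeed_le_iff uuids N).mp (by rw [hNdef])).1
    set q := -(PySem.Int.floordiv (-N) step) with hqdef
    have hq : (q - 1) * step < N ∧ N ≤ q * step :=
      (PySem.Int.neg_floordiv_neg_eq_iff_of_pos (by omega)).mp rfl
    have hq1 : 1 ≤ q := by
      by_contra h
      have h' : q ≤ 0 := by omega
      nlinarith [hq.2]
    have hsc : step ≤ q * step := by nlinarith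
    rw [if_neg (by omega : ¬ step < 1)]
    exact uuidALoop_spec uuids step maxlen hstep N hN hNdef.symm q hq.1 hq.2
      ((q * step - step).toNat) step 1 le_rfl le_rfl (one_mul step).symm hsc

@[simp] theorem uuid_prefix_len_raises : Claim_raises_uuid_prefix_len := by
  unfold Claim_raises_uuid_prefix_len
  constructor
  · intro uuids step maxlen _ hr hpre
    exact hpre.1 hr
  · refine ⟨by decide, by decide, by decide⟩
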